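-- pv_equiv track=rewrite | github.com/abiugu/PROJETOS | PROJETO PADROES BLAZE/analise de cores em dias consecutivos.py | encontrar_sequencias
-- ===== SOURCE A (Python) =====
-- def encontrar_sequencias(dias_processados):
--     sequencias = []
--
--     todos_dias = sorted(dias_processados.keys())
--
--     horarios = set()
--     for d in dias_processados:
--         horarios.update(dias_processados[d].keys())
--     horarios = sorted(horarios)
--
--     for horario in horarios:
--         ultima_cor = None
--         inicio_seq = None
--         contador = 0
--
--         for dia in todos_dias:
--             cor = dias_processados[dia].get(horario, None)
--
--             if cor is None:
--                 if contador > 0: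
--                     sequencias.append((horario, ultima_cor, inicio_seq, dia_anterior, contador))
--                 ultima_cor = None
--                 inicio_seq = None
--                 contador = 0
--
--             else:
--                 if cor == ultima_cor:
--                     contador += 1
--                 else:
--                     if contador > 0:
--                         sequencias.append((horario, ultima_cor, inicio_seq, dia_anterior, contador))
--                     ultima_cor = cor
--                     inicio_seq = dia
--                     contador = 1
--
--             dia_anterior = dia
--
--         if contador > 0:
--             sequencias.append((horario, ultima_cor, inicio_seq, dia_anterior, contador))
--
--     return sequencias
-- ===== SOURCE B (Python) =====
-- def encontrar_sequencias(dias_processados):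
--     todos_dias = sorted(dias_processados)
--     por_horario = {}
--     for i, dia in enumerate(todos_dias):
--         for horario, cor in dias_processados[dia].items():
--             por_horario.setdefault(horario, []).append((i, cor))
--     sequencias = []
--     for horario in sorted(por_horario):
--         prev_i = None
--         prev_cor = None
--         run_start = 0
--         count = 0
--         for i, cor in por_horario[horario]:
--             if prev_i is not None and i == prev_i + 1 and cor == prev_cor:
--                 count += 1
--             else:
--                 if count:
--                     sequencias.append((horario, prev_cor, todos_dias[run_start], todos_dias[prev_i], count))
--                 run_start = i
--                 prev_cor = cor
--                 count = 1
--             prev_i = i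
--         if count:
--             sequencias.append((horario, prev_cor, todos_dias[run_start], todos_dias[prev_i], count))
--     return sequencias
-- ===== Notes on version B (the rewrite author's own statement) =====
-- stated objective: faster
-- what changed: A scans every day for every time-slot (one dict.get per horario x dia pair); B makes a single pass over the enumerated sorted days grouping the (day-index, cor) entries per horario, then detects each horario's runs by index adjacency, touching every entry once.
import Mathlib
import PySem

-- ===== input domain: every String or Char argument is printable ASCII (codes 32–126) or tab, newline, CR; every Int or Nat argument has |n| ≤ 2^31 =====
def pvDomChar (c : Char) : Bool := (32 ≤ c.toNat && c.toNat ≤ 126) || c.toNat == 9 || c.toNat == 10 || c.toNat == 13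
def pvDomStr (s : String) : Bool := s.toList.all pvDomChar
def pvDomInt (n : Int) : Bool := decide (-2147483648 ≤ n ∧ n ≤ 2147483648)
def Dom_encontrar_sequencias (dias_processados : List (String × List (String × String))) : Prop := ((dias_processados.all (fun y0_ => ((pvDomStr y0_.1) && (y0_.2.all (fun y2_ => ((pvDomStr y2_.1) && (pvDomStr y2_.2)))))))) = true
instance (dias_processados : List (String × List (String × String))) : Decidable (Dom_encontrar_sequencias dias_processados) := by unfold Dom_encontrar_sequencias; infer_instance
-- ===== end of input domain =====

-- B replaces A's time-slot × day double scan by one grouping pass over the entries plus a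
-- run scan per time-slot over precomputed day indices (objective: faster). Neither program
-- mutates its argument.

abbrev pvOut : Type := List (String × String × String × String × Int)

-- helpers shared by both ports: the argument dict, its sorted day list, and a day's inner dict
def pvInner (D : PySem.Dict String (List (String × String))) (dia : String) : PySem.Dict String String :=
  PySem.Dict.ofList ((D.get? dia).getD [])

def pvTodos (D : PySem.Dict String (List (String × String))) : List String :=
  PySem.List.sorted D.keys (fun x => x) false

-- ===== PORT A =====
-- cor = dias_processados[dia].get(horario, None)
def pvCorDe (D : PySem.Dict String (List (String × String))) (dia horario : String) : Option String :=
  (pvInner D dia).get? horario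

-- A's inner-loop body. State = (ultima_cor, inicio_seq, contador, dia_anterior, sequencias).
-- Python's initial None/unbound inicio_seq and dia_anterior are carried as "": they are only
-- ever read under contador > 0, after the Python has assigned them a day string.
def pvStepA (horario dia : String) (cor : Option String)
    (st : Option String × String × Int × String × pvOut) :
    Option String × String × Int × String × pvOut :=
  match st with
  | (ultima, inicio, contador, dia_anterior, seqs) =>
    match cor with
    | none =>
        (none, "", 0, dia,
          if contador > 0 then seqs ++ [(horario, ultima.getD "", inicio, dia_anterior, contador)] else seqs)
    | some c =>
        if some c = ultima then (ultima, inicio, contador + 1, dia, seqs)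
        else (some c, dia, 1, dia,
          if contador > 0 then seqs ++ [(horario, ultima.getD "", inicio, dia_anterior, contador)] else seqs)

-- the trailing 'if contador > 0: sequencias.append(…)' after the day loop
def pvFinA (horario : String) (st : Option String × String × Int × String × pvOut) : pvOut :=
  match st with
  | (ultima, inicio, contador, dia_anterior, seqs) =>
    if contador > 0 then seqs ++ [(horario, ultima.getD "", inicio, dia_anterior, contador)] else seqs

-- horarios = sorted({h for d in dias_processados for h in dias_processados[d].keys()})
def pvHorariosA (D : PySem.Dict String (List (String × String))) : PySem.Set String :=
  D.keys.foldl (fun hs d => PySem.Set.update hs (pvInner D d).keys) PySem.Set.empty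

-- the body of A's outer 'for horario in horarios' loop
def pvBodyA (D : PySem.Dict String (List (String × String))) (sequencias : pvOut) (horario : String) : pvOut :=
  pvFinA horario ((pvTodos D).foldl (fun st dia => pvStepA horario dia (pvCorDe D dia horario) st)
    (none, "", 0, "", sequencias))

def encontrar_sequencias (dias_processados : List (String × List (String × String))) : List (String × String × String × String × Int) :=
  (PySem.List.sorted (pvHorariosA (PySem.Dict.ofList dias_processados)) (fun x => x) false).foldl
    (pvBodyA (PySem.Dict.ofList dias_processados)) []

-- ===== PORT B =====
-- B's run-scan body. State = (prev_i, prev_cor, run_start, count, sequencias). run_start and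
-- prev_i are only read (todos_dias[·]) under count > 0, after Source B has assigned them.
def pvStepB (todos_dias : List String) (horario : String)
    (st : Option Int × Option String × Int × Int × pvOut) (e : Int × String) :
    Option Int × Option String × Int × Int × pvOut :=
  match st, e with
  | (prev_i, prev_cor, run_start, count, seqs), (i, cor) =>
    if ((match prev_i with | some j => i == j + 1 | none => false) && (some cor == prev_cor)) then
      (some i, prev_cor, run_start, count + 1, seqs)
    else
      (some i, some cor, i, 1,
        if count > 0 then
          seqs ++ [(horario, prev_cor.getD "", PySem.List.pyGetD todos_dias run_start "",
                    PySem.List.pyGetD todos_dias (prev_i.getD 0) "", count)]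
        else seqs)

-- the trailing 'if count: sequencias.append(…)' after the entry loop
def pvFinB (todos_dias : List String) (horario : String)
    (st : Option Int × Option String × Int × Int × pvOut) : pvOut :=
  match st with
  | (prev_i, prev_cor, run_start, count, seqs) =>
    if count > 0 then
      seqs ++ [(horario, prev_cor.getD "", PySem.List.pyGetD todos_dias run_start "",
                PySem.List.pyGetD todos_dias (prev_i.getD 0) "", count)]
    else seqs

-- por_horario: one pass over the enumerated sorted days, appending (i, cor) per horario
def pvPor (D : PySem.Dict String (List (String × String))) : PySem.Dict String (List (Int × String)) :=
  (PySem.List.enumerate (pvTodos D)).foldl (fun por p =>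
    ((pvInner D p.2).items).foldl (fun por q => por.modify q.1 [] (fun l => l ++ [(p.1, q.2)])) por)
    PySem.Dict.empty

-- the body of B's outer 'for horario in sorted(por_horario)' loop
def pvBodyB (D : PySem.Dict String (List (String × String))) (sequencias : pvOut) (horario : String) : pvOut :=
  pvFinB (pvTodos D) horario (((pvPor D).getD horario []).foldl (pvStepB (pvTodos D) horario)
    (none, none, 0, 0, sequencias))

def encontrar_sequencias_alt (dias_processados : List (String × List (String × String))) : List (String × String × String × String × Int) :=
  (PySem.List.sorted (pvPor (PySem.Dict.ofList dias_processados)).keys (fun x => x) false).foldl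
    (pvBodyB (PySem.Dict.ofList dias_processados)) []

-- ===== PRECONDITION & SPEC =====
def Spec_encontrar_sequencias (dias_processados : List (String × List (String × String))) (out : List (String × String × String × String × Int)) : Prop := out = encontrar_sequencias_alt dias_processados
instance (dias_processados : List (String × List (String × String))) (out : List (String × String × String × String × Int)) : Decidable (Spec_encontrar_sequencias dias_processados out) := by unfold Spec_encontrar_sequencias; infer_instance

-- ===== CLAIM (what is proved, stated in full; the proofs are below) =====
def Claim_equal_encontrar_sequencias : Prop := ∀ (dias_processados : List (String × List (String × String))), Dom_encontrar_sequencias dias_processados → Spec_encontrar_sequencias dias_processados (encontrar_sequencias dias_processados)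

-- ===== LEMMAS AND PROOFS =====

-- the (index, cor) entries of horario h among the days of rest, numbered from s
def pvEntries (f : String → Option String) (rest : List String) (s : Int) : List (Int × String) :=
  (PySem.List.enumerate rest s).filterMap (fun p => (f p.2).map (fun c => (p.1, c)))

-- loop invariant tying A's day-scan state to B's entry-scan state after the first k days
def pvInv (todos : List String) (h : String) (k : Nat)
    (ultima : Option String) (inicio : String) (contador : Int) (dia_ant : String) (seqsA : pvOut)
    (prev_i : Option Int) (prev_cor : Option String) (run_start : Int) (count : Int) (seqsB : pvOut) : Prop :=
  (ultima = none ∧ contador = 0 ∧ prev_i = none ∧ prev_cor = none ∧ run_start = 0 ∧ count = 0 ∧ seqsA = seqsB)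
  ∨ (∃ (c : String) (r j : Nat), r ≤ j ∧ j + 1 = k ∧ j < todos.length ∧
      ultima = some c ∧ prev_cor = some c ∧ contador = count ∧ 0 < count ∧
      prev_i = some (j : Int) ∧ run_start = (r : Int) ∧
      inicio = todos.getD r "" ∧ dia_ant = todos.getD j "" ∧ seqsA = seqsB)
  ∨ (∃ (c : String) (r j : Nat), r ≤ j ∧ j + 1 < k ∧ j < todos.length ∧
      ultima = none ∧ contador = 0 ∧ prev_cor = some c ∧ prev_i = some (j : Int) ∧
      run_start = (r : Int) ∧ 0 < count ∧
      seqsA = seqsB ++ [(h, c, todos.getD r "", todos.getD j "", count)])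

set_option maxRecDepth 8192 in
lemma pvSync (todos : List String) (h : String) (f : String → Option String) :
    ∀ (rest : List String) (k : Nat)
      (ultima : Option String) (inicio : String) (contador : Int) (dia_ant : String) (seqsA : pvOut)
      (prev_i : Option Int) (prev_cor : Option String) (run_start : Int) (count : Int) (seqsB : pvOut),
      todos.drop k = rest →
      pvInv todos h k ultima inicio contador dia_ant seqsA prev_i prev_cor run_start count seqsB →
      pvFinA h (rest.foldl (fun st dia => pvStepA h dia (f dia) st) (ultima, inicio, contador, dia_ant, seqsA))
        = pvFinB todos h ((pvEntries f rest (k : Int)).foldl (pvStepB todos h)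
            (prev_i, prev_cor, run_start, count, seqsB)) := by
  intro rest
  induction rest with
  | nil =>
    intro k ultima inicio contador dia_ant seqsA prev_i prev_cor run_start count seqsB hdrop hinv
    simp only [List.foldl_nil, pvEntries, PySem.List.enumerate_nil, List.filterMap_nil]
    rcases hinv with ⟨rfl, rfl, rfl, rfl, rfl, rfl, rfl⟩ |
      ⟨c, r, j, hrj, hjk, hjlen, rfl, rfl, rfl, hcpos, rfl, rfl, rfl, rfl, rfl⟩ |
      ⟨c, r, j, hrj, hjk, hjlen, rfl, rfl, rfl, rfl, rfl, hcpos, rfl⟩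
    · simp [pvFinA, pvFinB]
    · simp only [pvFinA, pvFinB]
      rw [if_pos hcpos, if_pos hcpos]
      simp [PySem.List.pyGetD_natCast]
    · simp only [pvFinA, pvFinB]
      rw [if_neg (by norm_num : ¬ ((0:Int) > 0)), if_pos hcpos]
      simp [PySem.List.pyGetD_natCast]
  | cons d rest' ih =>
    intro k ultima inicio contador dia_ant seqsA prev_i prev_cor run_start count seqsB hdrop hinv
    have hk : k < todos.length := by
      by_contra hge
      push_neg at hge
      rw [List.drop_eq_nil_of_le hge] at hdrop
      cases hdrop
    have hcons := List.drop_eq_getElem_cons hk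
    rw [hdrop] at hcons
    injection hcons with hd hrest
    have hdg : d = todos.getD k "" := by rw [List.getD_eq_getElem todos "" hk]; exact hd
    have hrest' : todos.drop (k + 1) = rest' := hrest.symm
    have hcast : (k : Int) + 1 = ((k + 1 : Nat) : Int) := by push_cast; ring
    rw [List.foldl_cons]
    cases hfd : f d with
    | none =>
      have hent : pvEntries f (d :: rest') (k : Int) = pvEntries f rest' ((k + 1 : Nat) : Int) := by
        unfold pvEntries
        rw [PySem.List.enumerate_cons, List.filterMap_cons, hcast]
        simp [hfd]
      rw [hent]
      rcases hinv with ⟨rfl, rfl, rfl, rfl, rfl, rfl, rfl⟩ |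
        ⟨c, r, j, hrj, hjk, hjlen, rfl, rfl, rfl, hcpos, rfl, rfl, rfl, rfl, rfl⟩ |
        ⟨c, r, j, hrj, hjk, hjlen, rfl, rfl, rfl, rfl, rfl, hcpos, rfl⟩
      · rw [show pvStepA h d none (none, inicio, 0, dia_ant, seqsA) = (none, "", 0, d, seqsA) from by
          simp [pvStepA]]
        exact ih (k + 1) _ _ _ _ _ _ _ _ _ _ hrest'
          (Or.inl ⟨rfl, rfl, rfl, rfl, rfl, rfl, rfl⟩)
      · rw [show pvStepA h d none (some c, todos.getD r "", contador, todos.getD j "", seqsA)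
            = (none, "", 0, d, seqsA ++ [(h, c, todos.getD r "", todos.getD j "", contador)]) from by
          simp [pvStepA, hcpos]]
        exact ih (k + 1) _ _ _ _ _ _ _ _ _ _ hrest'
          (Or.inr (Or.inr ⟨c, r, j, hrj, by omega, hjlen, rfl, rfl, rfl, rfl, rfl, hcpos, rfl⟩))
      · rw [show pvStepA h d none (none, inicio, 0, dia_ant,
              seqsB ++ [(h, c, todos.getD r "", todos.getD j "", count)])
            = (none, "", 0, d, seqsB ++ [(h, c, todos.getD r "", todos.getD j "", count)]) from by
          simp [pvStepA]]
        exact ih (k + 1) _ _ _ _ _ _ _ _ _ _ hrest'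
          (Or.inr (Or.inr ⟨c, r, j, hrj, by omega, hjlen, rfl, rfl, rfl, rfl, rfl, hcpos, rfl⟩))
    | some c =>
      have hent : pvEntries f (d :: rest') (k : Int)
          = ((k : Int), c) :: pvEntries f rest' ((k + 1 : Nat) : Int) := by
        unfold pvEntries
        rw [PySem.List.enumerate_cons, List.filterMap_cons, hcast]
        simp [hfd]
      rw [hent, List.foldl_cons]
      rcases hinv with ⟨rfl, rfl, rfl, rfl, rfl, rfl, rfl⟩ |
        ⟨c0, r, j, hrj, hjk, hjlen, rfl, rfl, rfl, hcpos, rfl, rfl, rfl, rfl, rfl⟩ |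
        ⟨c0, r, j, hrj, hjk, hjlen, rfl, rfl, rfl, rfl, rfl, hcpos, rfl⟩
      · -- initial state: both start a fresh run at k
        rw [show pvStepA h d (some c) (none, inicio, 0, dia_ant, seqsA) = (some c, d, 1, d, seqsA) from by
          simp [pvStepA]]
        rw [show pvStepB todos h (none, none, 0, 0, seqsA) ((k : Int), c)
            = (some (k : Int), some c, (k : Int), 1, seqsA) from by simp [pvStepB]]
        exact ih (k + 1) _ _ _ _ _ _ _ _ _ _ hrest'
          (Or.inr (Or.inl ⟨c, k, k, le_refl k, rfl, hk, rfl, rfl, rfl, one_pos, rfl, rfl, hdg, hdg, rfl⟩))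
      · -- in-run at j = k-1 with colour c0
        have hbeqi : ((k : Int) == (j : Int) + 1) = true := by
          rw [beq_iff_eq]; exact_mod_cast (by omega : k = j + 1)
        by_cases hc : c = c0
        · subst hc
          rw [show pvStepA h d (some c) (some c, todos.getD r "", contador, todos.getD j "", seqsA)
              = (some c, todos.getD r "", contador + 1, d, seqsA) from by simp [pvStepA]]
          rw [show pvStepB todos h (some (j : Int), some c, (r : Int), contador, seqsA) ((k : Int), c)
              = (some (k : Int), some c, (r : Int), contador + 1, seqsA) from by
            simp [pvStepB, hbeqi]]
          exact ih (k + 1) _ _ _ _ _ _ _ _ _ _ hrest'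
            (Or.inr (Or.inl ⟨c, r, k, by omega, rfl, hk, rfl, rfl, rfl, by omega, rfl, rfl, rfl, hdg, rfl⟩))
        · have hbeqc : ((some c : Option String) == some c0) = false := by
            rw [beq_eq_false_iff_ne]; simpa using hc
          rw [show pvStepA h d (some c) (some c0, todos.getD r "", contador, todos.getD j "", seqsA)
              = (some c, d, 1, d, seqsA ++ [(h, c0, todos.getD r "", todos.getD j "", contador)]) from by
            simp [pvStepA, hcpos, hc]]
          rw [show pvStepB todos h (some (j : Int), some c0, (r : Int), contador, seqsA) ((k : Int), c)
              = (some (k : Int), some c, (k : Int), 1,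
                  seqsA ++ [(h, c0, todos.getD r "", todos.getD j "", contador)]) from by
            simp [pvStepB, hbeqc, hcpos, PySem.List.pyGetD_natCast]]
          exact ih (k + 1) _ _ _ _ _ _ _ _ _ _ hrest'
            (Or.inr (Or.inl ⟨c, k, k, le_refl k, rfl, hk, rfl, rfl, rfl, one_pos, rfl, rfl, hdg, hdg, rfl⟩))
      · -- pending broken run: B flushes it now, A already appended it
        have hbeqi : ((k : Int) == (j : Int) + 1) = false := by
          rw [beq_eq_false_iff_ne]
          intro hh
          have : k = j + 1 := by exact_mod_cast hh
          omega
        rw [show pvStepA h d (some c) (none, inicio, 0, dia_ant,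
              seqsB ++ [(h, c0, todos.getD r "", todos.getD j "", count)])
            = (some c, d, 1, d, seqsB ++ [(h, c0, todos.getD r "", todos.getD j "", count)]) from by
          simp [pvStepA]]
        rw [show pvStepB todos h (some (j : Int), some c0, (r : Int), count, seqsB) ((k : Int), c)
            = (some (k : Int), some c, (k : Int), 1,
                seqsB ++ [(h, c0, todos.getD r "", todos.getD j "", count)]) from by
          simp [pvStepB, hbeqi, hcpos, PySem.List.pyGetD_natCast]]
        exact ih (k + 1) _ _ _ _ _ _ _ _ _ _ hrest'
          (Or.inr (Or.inl ⟨c, k, k, le_refl k, rfl, hk, rfl, rfl, rfl, one_pos, rfl, rfl, hdg, hdg, rfl⟩))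

-- nested foldl over a flatMap
lemma pvFoldl_flatMap {α β γ : Type} (l : List α) (g : α → List β) (f : γ → β → γ) (i : γ) :
    (l.flatMap g).foldl f i = l.foldl (fun acc a => (g a).foldl f acc) i := by
  induction l generalizing i with
  | nil => rfl
  | cons a t ih => simp [List.flatMap_cons, List.foldl_append, ih]

-- keys of a Dict.insert
lemma pvKeys_insert {ν : Type} (d : PySem.Dict String ν) (k : String) (v : ν) :
    (d.insert k v).keys = if k ∈ d.keys then d.keys else d.keys ++ [k] := by
  by_cases hk : k ∈ d.keys
  · have hc : d.contains k = true := (PySem.Dict.contains_iff_mem_keys d k).mpr hk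
    rw [if_pos hk]
    simp only [PySem.Dict.insert, hc, if_pos, PySem.Dict.keys, List.map_map]
    apply List.map_congr_left
    intro p _
    by_cases hp : p.1 = k
    · simp [hp]
    · simp [hp]
  · have hc : d.contains k = false := by
      by_contra hcc
      exact hk ((PySem.Dict.contains_iff_mem_keys d k).mp (by simpa using hcc))
    rw [if_neg hk]
    simp [PySem.Dict.insert, hc, PySem.Dict.keys]

-- keys of the grouping fold are the Set.update of the fed keys
lemma pvKeys_foldl_modify {β : Type} (l : List (String × β)) (d : PySem.Dict String (List β)) :
    (l.foldl (fun d q => d.modify q.1 [] (fun v => v ++ [q.2])) d).keys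
      = PySem.Set.update d.keys (l.map (·.1)) := by
  induction l generalizing d with
  | nil => simp [PySem.Set.update]
  | cons q t ih =>
    rw [List.foldl_cons, ih, List.map_cons, PySem.Set.update_cons]
    congr 1
    rw [PySem.Dict.modify, pvKeys_insert]
    by_cases hq : q.1 ∈ d.keys
    · simp [PySem.Set.add, hq]
    · simp [PySem.Set.add, hq]

-- getD of the grouping fold collects the payloads of the matching keys, in order
lemma pvGetD_foldl_modify {β : Type} (l : List (String × β)) (d : PySem.Dict String (List β)) (k : String) :
    (l.foldl (fun d q => d.modify q.1 [] (fun v => v ++ [q.2])) d).getD k []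
      = d.getD k [] ++ (l.filter (fun q => q.1 == k)).map (·.2) := by
  induction l generalizing d with
  | nil => simp
  | cons q t ih =>
    rw [List.foldl_cons, ih]
    by_cases hq : q.1 = k
    · subst hq
      rw [PySem.Dict.modify, PySem.Dict.getD_insert_self]
      simp
    · rw [PySem.Dict.modify, PySem.Dict.getD_insert_of_ne _ _ _ (Ne.symm hq)]
      simp [hq]

-- for a nodup-key item list, filtering at a key is find?, i.e. get?
lemma pvFilter_key {β : Type} (l : List (String × β)) (h : String) (hn : (l.map Prod.fst).Nodup) :
    (l.filter (fun q => q.1 == h)).map (·.2) = ((l.find? (fun q => q.1 == h)).map (·.2)).toList := by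
  induction l with
  | nil => simp
  | cons a t ih =>
    rw [List.map_cons] at hn
    have hna := (List.nodup_cons.mp hn).1
    have hnt := (List.nodup_cons.mp hn).2
    by_cases ha : a.1 = h
    · have ht : t.filter (fun q => q.1 == h) = [] := by
        rw [List.filter_eq_nil_iff]
        intro q hq hqh
        exact hna (ha ▸ (beq_iff_eq.mp hqh) ▸ List.mem_map_of_mem hq)
      simp [List.filter_cons, ha, ht]
    · simp only [List.filter_cons, List.find?_cons]
      have : (a.1 == h) = false := beq_eq_false_iff_ne.mpr ha
      rw [this]
      simp only [Bool.false_eq_true, if_false]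
      exact ih hnt

-- the big flattened entry stream of B's grouping pass
def pvBig (D : PySem.Dict String (List (String × String))) : List (String × (Int × String)) :=
  (PySem.List.enumerate (pvTodos D)).flatMap
    (fun p => ((pvInner D p.2).items).map (fun q => (q.1, (p.1, q.2))))

lemma pvPor_eq (D : PySem.Dict String (List (String × String))) :
    pvPor D = (pvBig D).foldl (fun d q => d.modify q.1 [] (fun v => v ++ [q.2])) PySem.Dict.empty := by
  unfold pvPor pvBig
  rw [pvFoldl_flatMap]
  congr 1
  funext por p
  rw [List.foldl_map]

lemma pvPor_getD (D : PySem.Dict String (List (String × String))) (h : String) :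
    (pvPor D).getD h [] = pvEntries (fun d => pvCorDe D d h) (pvTodos D) 0 := by
  rw [pvPor_eq, pvGetD_foldl_modify]
  have hempty : (PySem.Dict.empty : PySem.Dict String (List (Int × String))).getD h [] = [] := rfl
  rw [hempty, List.nil_append]
  unfold pvBig pvEntries
  rw [List.filter_flatMap, List.map_flatMap, List.filterMap_eq_flatMap_toList]
  congr 1
  funext p
  rw [List.filter_map]
  have hpred : ((fun (q : String × (Int × String)) => q.1 == h) ∘ (fun (q : String × String) => (q.1, (p.1, q.2)))) = (fun (q : String × String) => q.1 == h) := rfl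
  rw [hpred, List.map_map]
  have hcomp : ((fun (q : String × (Int × String)) => q.2) ∘ (fun (q : String × String) => (q.1, (p.1, q.2)))) = ((fun (c : String) => (p.1, c)) ∘ (fun (q : String × String) => q.2)) := rfl
  rw [hcomp, ← List.map_map]
  rw [pvFilter_key ((pvInner D p.2).items) h (PySem.Dict.nodup_keys_ofList ((D.get? p.2).getD []))]
  rw [← Option.toList_map]
  rfl

-- membership and nodup of a fold of Set.update
lemma pvMem_foldl_update (g : String → List String) :
    ∀ (l : List String) (s : PySem.Set String) (x : String),
      x ∈ l.foldl (fun hs d => PySem.Set.update hs (g d)) s ↔ x ∈ s ∨ ∃ d ∈ l, x ∈ g d := by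
  intro l
  induction l with
  | nil => simp
  | cons a t ih =>
    intro s x
    rw [List.foldl_cons, ih, PySem.Set.mem_update]
    constructor
    · rintro ((hs | hg) | ⟨d, hd, hx⟩)
      · exact Or.inl hs
      · exact Or.inr ⟨a, List.mem_cons_self, hg⟩
      · exact Or.inr ⟨d, List.mem_cons_of_mem _ hd, hx⟩
    · rintro (hs | ⟨d, hd, hx⟩)
      · exact Or.inl (Or.inl hs)
      · rcases List.mem_cons.mp hd with rfl | hd'
        · exact Or.inl (Or.inr hx)
        · exact Or.inr ⟨d, hd', hx⟩

lemma pvNodup_foldl_update (g : String → List String) :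
    ∀ (l : List String) (s : PySem.Set String), s.Nodup →
      (l.foldl (fun hs d => PySem.Set.update hs (g d)) s).Nodup := by
  intro l
  induction l with
  | nil => intro s hs; exact hs
  | cons a t ih => intro s hs; exact ih _ (PySem.Set.nodup_update s (g a) hs)

lemma pvMem_horariosA (D : PySem.Dict String (List (String × String))) (x : String) :
    x ∈ (pvHorariosA D : List String) ↔ ∃ d ∈ D.keys, x ∈ (pvInner D d).keys := by
  unfold pvHorariosA
  rw [pvMem_foldl_update]
  simp [PySem.Set.empty]

lemma pvMem_porKeys (D : PySem.Dict String (List (String × String))) (x : String) :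
    x ∈ (pvPor D).keys ↔ ∃ d ∈ D.keys, x ∈ (pvInner D d).keys := by
  rw [pvPor_eq, pvKeys_foldl_modify]
  have hemp : (PySem.Dict.empty : PySem.Dict String (List (Int × String))).keys = ([] : List String) := rfl
  rw [hemp]
  rw [show PySem.Set.update ([] : List String) ((pvBig D).map (·.1)) = PySem.Set.ofList ((pvBig D).map (·.1)) from rfl]
  rw [PySem.Set.mem_ofList]
  unfold pvBig
  simp only [List.map_flatMap, List.mem_flatMap, List.map_map, List.mem_map]
  constructor
  · rintro ⟨p, hp, q, hq, rfl⟩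
    rcases (PySem.List.mem_enumerate_iff _ _ _).mp hp with ⟨k, hk, rfl⟩
    refine ⟨(pvTodos D)[k], ?_, ?_⟩
    · rw [← PySem.List.mem_sorted D.keys (fun x => x) false]
      exact List.getElem_mem hk
    · exact List.mem_map_of_mem hq
  · rintro ⟨d, hd, hx⟩
    have hd' : d ∈ pvTodos D := (PySem.List.mem_sorted D.keys (fun x => x) false d).mpr hd
    rcases List.mem_iff_getElem.mp hd' with ⟨k, hk, rfl⟩
    rcases List.mem_map.mp hx with ⟨q, hq, rfl⟩
    exact ⟨((0 : Int) + (k : Int), (pvTodos D)[k]),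
      (PySem.List.mem_enumerate_iff _ _ _).mpr ⟨k, hk, rfl⟩, q, hq, rfl⟩

lemma pvSortedKeys_eq (D : PySem.Dict String (List (String × String))) :
    PySem.List.sorted (pvHorariosA D : List String) (fun x => x) false
      = PySem.List.sorted (pvPor D).keys (fun x => x) false := by
  apply (PySem.List.sorted_id_eq_sorted_id_iff_perm _ _).mpr
  apply List.perm_of_nodup_nodup_toFinset_eq
  · exact pvNodup_foldl_update _ D.keys [] List.nodup_nil
  · rw [pvPor_eq, pvKeys_foldl_modify]
    exact PySem.Set.nodup_update _ _ List.nodup_nil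
  · ext x
    rw [List.mem_toFinset, List.mem_toFinset, pvMem_horariosA, pvMem_porKeys]

lemma pvBody_eq (D : PySem.Dict String (List (String × String))) (seqs : pvOut) (horario : String) :
    pvBodyA D seqs horario = pvBodyB D seqs horario := by
  unfold pvBodyA pvBodyB
  rw [pvPor_getD]
  have h := pvSync (pvTodos D) horario (fun d => pvCorDe D d horario) (pvTodos D) 0
    none "" 0 "" seqs none none 0 0 seqs List.drop_zero
    (Or.inl ⟨rfl, rfl, rfl, rfl, rfl, rfl, rfl⟩)
  simpa using h

-- ===== VERDICT (by name: the statement is the Claim_ definition above) =====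
theorem encontrar_sequencias_spec : Claim_equal_encontrar_sequencias := by
  intro dias _dom
  unfold Spec_encontrar_sequencias encontrar_sequencias encontrar_sequencias_alt
  rw [pvSortedKeys_eq]
  congr 1
  funext s h
  exact pvBody_eq _ s h
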